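-- pv_equiv track=rewrite | github.com/GHengeveld/PopiView | src/popiview/hit.py | _urlparser
-- ===== SOURCE A (Python) =====
-- def _urlparser(url):
--     # Filters is a list of tuples, following the pattern:
--     # int:urlparse index, string:find, string:replace [, int: position]
--     filters = [('endswith', 2, '/', ''),
--                ('replace', 1, 'www.', '', 1)]
--
--     for f in filters:
--         if f[0] == 'endswith':
--             if url[f[1]].endswith(f[2]):
--                 url[f[1]] = url[f[1]][:-len(f[2])] + f[3]
--         elif f[0] == 'replace':
--             if f[4]:
--                 url[f[1]] = url[f[1]].replace(f[2], f[3], f[4])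
--             else:
--                 url[f[1]] = url[f[1]].replace(f[2], f[3])
--         elif f[0] == 'cutoff':
--             strpos = url[f[1]].find(f[2])
--             if strpos >= 0:
--                 url[f[1]] = url[f[1]][:strpos]
--                 #if url[f[1]][-1] == '&' or url[f[1]][-1] == '?':
--                 #    url[f[1]] = url[f[1]][:-1]
--     return url
-- ===== SOURCE B (Python) =====
-- def _urlparser(url):
--     # Straight-line version of the two fixed filter rules (mutates url in place, like A).
--     if url[2].endswith('/'):
--         url[2] = url[2][:-1]
--     url[1] = url[1].replace('www.', '', 1)
--     return url
-- ===== Notes on version B (the rewrite author's own statement) =====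
-- stated objective: simpler
-- what changed: Replaced the data-driven filter table and opcode-dispatch interpreter loop (with a dead 'cutoff' branch) by two straight-line statements performing the same trailing-slash strip and single 'www.' replacement.
import Mathlib
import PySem

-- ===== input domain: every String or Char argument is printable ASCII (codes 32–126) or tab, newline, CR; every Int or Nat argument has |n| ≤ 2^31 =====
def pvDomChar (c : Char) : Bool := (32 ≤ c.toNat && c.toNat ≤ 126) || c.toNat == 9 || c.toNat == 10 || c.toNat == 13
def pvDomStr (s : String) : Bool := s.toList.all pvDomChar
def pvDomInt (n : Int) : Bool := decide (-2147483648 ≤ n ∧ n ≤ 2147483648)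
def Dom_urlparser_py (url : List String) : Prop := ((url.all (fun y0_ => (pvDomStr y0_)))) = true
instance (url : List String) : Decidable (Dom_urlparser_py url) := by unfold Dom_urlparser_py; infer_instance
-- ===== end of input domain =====

-- B mutates its argument in place exactly like A; the equivalence proved here is about the return value.

-- hand port of str.replace(old, new, cnt) for cnt ≥ 0: replace the first cnt occurrences
-- left to right; exact vs Python for nonempty old (the only call here uses old = "www.", cnt = 1)
def pyReplaceCnt : List Char → List Char → List Char → Nat → List Char
  | s, _, _, 0 => s
  | s, old, new, (n+1) =>
    let i := PySem.Chars.find s old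
    if i < 0 then s
    else s.take i.toNat ++ new ++ pyReplaceCnt (s.drop (i.toNat + old.length)) old new n

-- ===== PORT A =====
-- the fixed filter table; the Python 4-tuple ('endswith', 2, '/', '') is padded with a final 0,
-- which is never read in the endswith branch (mirroring Python, where f[4] is not accessed there)
def pvFilters : List (String × Int × String × String × Int) :=
  [("endswith", 2, "/", "", 0), ("replace", 1, "www.", "", 1)]

def urlparser_py (url : List String) : List String :=
  pvFilters.foldl (fun url f =>
    if f.1 == "endswith" then
      if PySem.Str.endswith (PySem.List.pyGetD url f.2.1 "") f.2.2.1 then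
        PySem.List.pySetD url f.2.1
          (String.mk (PySem.Chars.slice (PySem.List.pyGetD url f.2.1 "").toList none
              (some (-(PySem.Str.len f.2.2.1 : Int))) ++ f.2.2.2.1.toList))
      else url
    else if f.1 == "replace" then
      if f.2.2.2.2 ≠ 0 then
        PySem.List.pySetD url f.2.1
          (String.mk (pyReplaceCnt (PySem.List.pyGetD url f.2.1 "").toList
              f.2.2.1.toList f.2.2.2.1.toList f.2.2.2.2.toNat))
      else
        PySem.List.pySetD url f.2.1
          (PySem.Str.replace (PySem.List.pyGetD url f.2.1 "") f.2.2.1 f.2.2.2.1)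
    else if f.1 == "cutoff" then
      let strpos := PySem.Str.find (PySem.List.pyGetD url f.2.1 "") f.2.2.1
      if strpos ≥ 0 then
        PySem.List.pySetD url f.2.1
          (String.mk (PySem.Chars.slice (PySem.List.pyGetD url f.2.1 "").toList none (some strpos)))
      else url
    else url) url

-- ===== PORT B =====
def urlparser_py_alt (url : List String) : List String :=
  let s2 := PySem.List.pyGetD url 2 ""
  let url :=
    if PySem.Str.endswith s2 "/" then
      PySem.List.pySetD url 2 (String.mk (PySem.Chars.slice s2.toList none (some (-1))))
    else url
  let s1 := PySem.List.pyGetD url 1 ""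
  PySem.List.pySetD url 1 (String.mk (pyReplaceCnt s1.toList "www.".toList "".toList 1))

-- ===== PRECONDITION & SPEC =====
-- Pre_ excludes only inputs on which A raises IndexError (url[2] / url[1] with fewer than 3 items)
def Pre_urlparser_py (url : List String) : Prop := 3 ≤ url.length
instance (url : List String) : Decidable (Pre_urlparser_py url) := by unfold Pre_urlparser_py; infer_instance
def pvWitness_urlparser_py : List String := ["http", "www.example.com", "/path/"]

def Spec_urlparser_py (url : List String) (out : List String) : Prop := out = urlparser_py_alt url
instance (url : List String) (out : List String) : Decidable (Spec_urlparser_py url out) := by unfold Spec_urlparser_py; infer_instance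

-- ===== CLAIM (what is proved, stated in full; the proofs are below) =====
def Claim_equal_urlparser_py : Prop := ∀ (url : List String), Dom_urlparser_py url → Pre_urlparser_py url → Spec_urlparser_py url (urlparser_py url)

-- ===== LEMMAS AND PROOFS =====

-- ===== VERDICT (by name: the statement is the Claim_ definition above) =====
theorem urlparser_py_spec : Claim_equal_urlparser_py := by
  intro url _ _
  unfold Spec_urlparser_py urlparser_py urlparser_py_alt pvFilters
  simp [List.foldl]
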